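-- pv_equiv track=rewrite | github.com/lucaskmk/Python | Aulas-1semestre/Aula7_For/abobora.py | maior_abobora
-- ===== SOURCE A (Python) =====
-- def maior_abobora(especie, lf):
--     maxsize = 0
--     posf = -1
--     for f in range(len(lf)):
--         for a in lf[f]:
--             if (a[1] == especie) and (a[0] > maxsize):# >= seria o ultimo valor com mesmas caracteristicas em caso de empate
--                 maxsize = a[0]
--                 posf = f
--     return posf
-- ===== SOURCE B (Python) =====
-- def maior_abobora(especie, lf):
--     # Stage 1: flatten to a list of (size, field-index) candidates of the species
--     # with positive size (sizes <= 0 can never beat the 0 threshold).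
--     cands = [(a[0], f) for f, field in enumerate(lf) for a in field
--              if a[1] == especie and a[0] > 0]
--     if not cands:
--         return -1
--     # Stage 2: the overall best size.
--     best = max(s for s, _ in cands)
--     # Stage 3: the first field holding a pumpkin of that size.
--     return next(f for s, f in cands if s == best)
-- ===== Notes on version B (the rewrite author's own statement) =====
-- stated objective: alternative
-- what changed: Replaces A's single online pass with a running (maxsize, field) accumulator by a staged pipeline: first materialize the flat list of (size, field) candidates of the species with positive size, then compute the global maximum size, then scan for the first field attaining it.
import Mathlib
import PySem

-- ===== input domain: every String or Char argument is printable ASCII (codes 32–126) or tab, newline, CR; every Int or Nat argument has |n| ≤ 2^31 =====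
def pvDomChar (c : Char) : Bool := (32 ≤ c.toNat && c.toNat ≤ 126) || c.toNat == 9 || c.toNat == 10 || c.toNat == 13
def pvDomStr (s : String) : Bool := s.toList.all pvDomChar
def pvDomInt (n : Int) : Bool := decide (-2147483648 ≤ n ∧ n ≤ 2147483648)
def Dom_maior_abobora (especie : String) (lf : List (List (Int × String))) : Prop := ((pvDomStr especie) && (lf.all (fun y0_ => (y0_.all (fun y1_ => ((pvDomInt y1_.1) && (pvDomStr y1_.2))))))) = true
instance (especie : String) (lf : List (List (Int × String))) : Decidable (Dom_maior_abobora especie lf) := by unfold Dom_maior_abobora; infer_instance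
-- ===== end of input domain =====

-- B replaces A's single online pass (running maxsize/field accumulator) by a staged pipeline:
-- materialize the flat candidate list, take its global maximum, then find the first field
-- attaining it (objective: alternative).

-- ===== PORT A =====
def maior_abobora (especie : String) (lf : List (List (Int × String))) : Int :=
  let st := (PySem.List.pyRange 0 (lf.length : Int)).foldl
    (fun (st : Int × Int) f =>
      (PySem.List.pyGetD lf f []).foldl
        (fun (st : Int × Int) a =>
          if a.2 == especie && decide (a.1 > st.1) then (a.1, f) else st) st)
    (0, -1)
  st.2

-- ===== PORT B =====
def maior_abobora_alt (especie : String) (lf : List (List (Int × String))) : Int :=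
  let cands : List (Int × Int) :=
    (PySem.List.enumerate lf).flatMap (fun p =>
      (p.2.filter (fun a => a.2 == especie && decide (a.1 > 0))).map (fun a => (a.1, p.1)))
  match cands with
  | [] => -1
  | c :: t =>
    let best := (PySem.List.max? ((c :: t).map Prod.fst) (fun x => x)).getD 0
    ((((c :: t).find? (fun q => q.1 == best)).map Prod.snd).getD (-1))

-- ===== PRECONDITION & SPEC =====
def Spec_maior_abobora (especie : String) (lf : List (List (Int × String))) (out : Int) : Prop := out = maior_abobora_alt especie lf
instance (especie : String) (lf : List (List (Int × String))) (out : Int) : Decidable (Spec_maior_abobora especie lf out) := by unfold Spec_maior_abobora; infer_instance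

-- ===== CLAIM (what is proved, stated in full; the proofs are below) =====
def Claim_equal_maior_abobora : Prop := ∀ (especie : String) (lf : List (List (Int × String))), Dom_maior_abobora especie lf → Spec_maior_abobora especie lf (maior_abobora especie lf)

-- ===== LEMMAS AND PROOFS =====

-- the flat candidate stream of the species (no positivity filter), as (size, field) pairs
def pvCands (especie : String) (lf : List (List (Int × String))) : List (Int × Int) :=
  (PySem.List.enumerate lf).flatMap (fun p =>
    (p.2.filter (fun a => a.2 == especie)).map (fun a => (a.1, p.1)))

-- A's flat step
def pvStep (st q : Int × Int) : Int × Int := if q.1 > st.1 then (q.1, q.2) else st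

def pvMax (C : List (Int × Int)) (m : Int) : Int := (C.map Prod.fst).foldl max m

theorem pv_foldl_max_pull (t : List Int) :
    ∀ a b : Int, t.foldl max (max a b) = max a (t.foldl max b) := by
  induction t with
  | nil => intro a b; simp
  | cons x t ih =>
    intro a b
    simp only [List.foldl_cons, max_assoc, ih]

theorem pvMax_cons (q : Int × Int) (t : List (Int × Int)) (m : Int) :
    pvMax (q :: t) m = max m (pvMax t q.1) := by
  simp only [pvMax, List.map_cons, List.foldl_cons]
  exact pv_foldl_max_pull _ m q.1

theorem pvMax_le (C : List (Int × Int)) (m : Int) : m ≤ pvMax C m := by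
  induction C generalizing m with
  | nil => simp [pvMax]
  | cons q t ih => rw [pvMax_cons]; exact le_max_left _ _

theorem pvMax_mem (C : List (Int × Int)) (m : Int) :
    pvMax C m = m ∨ ∃ q ∈ C, q.1 = pvMax C m := by
  induction C generalizing m with
  | nil => left; simp [pvMax]
  | cons q t ih =>
    rw [pvMax_cons]
    rcases max_choice m (pvMax t q.1) with h | h
    · left; exact h
    · rcases ih q.1 with h2 | ⟨r, hr, hr2⟩
      · right; exact ⟨q, List.mem_cons_self, by rw [h, h2]⟩
      · right; exact ⟨r, List.mem_cons_of_mem _ hr, by rw [h, hr2]⟩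

theorem pv_find_some (C : List (Int × Int)) (m : Int) (h : m < pvMax C m) :
    (C.find? (fun q => q.1 == pvMax C m)).isSome = true := by
  rw [List.find?_isSome]
  rcases pvMax_mem C m with h2 | ⟨q, hq, hq2⟩
  · omega
  · exact ⟨q, hq, by simpa using hq2⟩

theorem pvMax_ge_mem (C : List (Int × Int)) (m : Int) :
    ∀ q ∈ C, q.1 ≤ pvMax C m := by
  induction C generalizing m with
  | nil => intro q hq; cases hq
  | cons r t ih =>
    intro q hq
    rw [pvMax_cons]
    rcases List.mem_cons.mp hq with h | h
    · subst h; exact le_trans (pvMax_le t q.1) (le_max_right _ _)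
    · exact le_trans (ih r.1 q h) (le_max_right _ _)

theorem pvMax_mono (t : List (Int × Int)) (a b : Int) (h : a ≤ b) :
    pvMax t a ≤ pvMax t b := by
  induction t generalizing a b with
  | nil => simpa [pvMax]
  | cons r t ih => rw [pvMax_cons, pvMax_cons]; exact max_le_max h le_rfl

-- characterization of A's flat fold: final max and first attaining field
theorem pv_runfold (C : List (Int × Int)) :
    ∀ m p : Int,
      C.foldl pvStep (m, p)
        = (pvMax C m,
           if m < pvMax C m
           then ((C.find? (fun q => q.1 == pvMax C m)).map Prod.snd).getD p
           else p) := by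
  induction C with
  | nil => intro m p; simp [pvMax]
  | cons q t ih =>
    intro m p
    rw [List.foldl_cons, pvMax_cons]
    by_cases h : q.1 > m
    · have hstep : pvStep (m, p) q = (q.1, q.2) := by simp [pvStep, h]
      have hM : max m (pvMax t q.1) = pvMax t q.1 :=
        max_eq_right (le_trans (le_of_lt h) (pvMax_le t q.1))
      rw [hstep, ih q.1 q.2, hM]
      have hmlt : m < pvMax t q.1 := lt_of_lt_of_le h (pvMax_le t q.1)
      rw [if_pos hmlt]
      by_cases he : q.1 = pvMax t q.1
      · have hfind : (q :: t).find? (fun r => r.1 == pvMax t q.1) = some q :=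
          List.find?_cons_of_pos (h := by simpa using he)
        rw [if_neg (by omega), hfind]; rfl
      · have hlt : q.1 < pvMax t q.1 := lt_of_le_of_ne (pvMax_le t q.1) he
        rw [if_pos hlt, List.find?_cons_of_neg (h := by simpa using he)]
        rcases Option.isSome_iff_exists.mp (pv_find_some t q.1 hlt) with ⟨r, hr⟩
        rw [hr]; rfl
    · have hstep : pvStep (m, p) q = (m, p) := by simp [pvStep, h]
      have hq1 : q.1 ≤ m := le_of_not_gt h
      have hM : max m (pvMax t q.1) = pvMax t m := by
        apply le_antisymm
        · exact max_le (pvMax_le t m) (pvMax_mono t _ _ hq1)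
        · rcases pvMax_mem t m with h1 | ⟨r, hr, hr2⟩
          · rw [h1]; exact le_max_left _ _
          · rw [← hr2]; exact le_trans (pvMax_ge_mem t q.1 r hr) (le_max_right _ _)
      rw [hstep, ih m p, hM]
      by_cases h2 : m < pvMax t m
      · rw [if_pos h2, if_pos h2,
          List.find?_cons_of_neg (h := by simp; omega)]
      · rw [if_neg h2, if_neg h2]

-- dropping non-positive sizes does not change a fold-max whose base dominates them
theorem pv_max_filter (l : List Int) (b : Int) :
    ∀ c : Int, b ≤ c →
      l.foldl max c = (l.filter (fun v => decide (b < v))).foldl max c := by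
  induction l with
  | nil => intro c _; simp
  | cons v t ih =>
    intro c hc
    by_cases h : b < v
    · rw [List.filter_cons_of_pos (by simpa using h), List.foldl_cons, List.foldl_cons]
      exact ih (max c v) (le_trans hc (le_max_left _ _))
    · rw [List.filter_cons_of_neg (by simpa using h), List.foldl_cons,
        max_eq_left (le_trans (le_of_not_gt h) hc)]
      exact ih c hc

-- find? is unchanged when the predicates agree on every member
theorem pv_find_congr {α : Type} (l : List α) (p q : α → Bool)
    (h : ∀ x ∈ l, p x = q x) : l.find? p = l.find? q := by
  induction l with
  | nil => rfl
  | cons x t ih =>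
    have hx := h x List.mem_cons_self
    by_cases hp : p x = true
    · rw [List.find?_cons_of_pos (h := hp), List.find?_cons_of_pos (h := hx ▸ hp)]
    · rw [List.find?_cons_of_neg (h := hp),
        List.find?_cons_of_neg (h := by rw [← hx]; exact hp),
        ih (fun y hy => h y (List.mem_cons_of_mem _ hy))]

theorem pv_bridge {β : Type} (lf : List (List (Int × String))) (g : β → Int → List (Int × String) → β) :
    ∀ (s : Int) (init : β),
      (List.range lf.length).foldl (fun (st : β) (k : Nat) => g st (s + (k : Int)) (lf.getD k [])) init
        = (PySem.List.enumerate lf s).foldl (fun st q => g st q.1 q.2) init := by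
  induction lf with
  | nil => intro s init; simp [PySem.List.enumerate]
  | cons x t ih =>
    intro s init
    simp only [List.length_cons, List.range_succ_eq_map, List.foldl_cons, List.foldl_map,
      PySem.List.enumerate]
    rw [show s + ((0 : Nat) : Int) = s by simp, show (x :: t).getD 0 [] = x from rfl]
    have hcongr : (List.range t.length).foldl
        (fun (st : β) (k : Nat) => g st (s + ((k + 1 : Nat) : Int)) ((x :: t).getD (k + 1) []))
        (g init s x)
      = (List.range t.length).foldl
        (fun (st : β) (k : Nat) => g st ((s + 1) + (k : Int)) (t.getD k [])) (g init s x) := by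
      apply PySem.List.foldl_congr_mem
      intro acc k _
      have hk : s + ((k + 1 : Nat) : Int) = (s + 1) + (k : Int) := by push_cast; ring
      rw [hk]
      rfl
    rw [hcongr, ih (s + 1) (g init s x)]

-- A rewritten as the flat fold over pvCands
theorem pv_A_flat (especie : String) (lf : List (List (Int × String))) :
    maior_abobora especie lf = ((pvCands especie lf).foldl pvStep (0, -1)).2 := by
  apply congrArg Prod.snd
  show (PySem.List.pyRange 0 (lf.length : Int)).foldl
      (fun (st : Int × Int) f =>
        (PySem.List.pyGetD lf f []).foldl
          (fun (st : Int × Int) a =>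
            if a.2 == especie && decide (a.1 > st.1) then (a.1, f) else st) st)
      (0, -1) = _
  rw [PySem.List.pyRange_zero_natCast, List.foldl_map]
  have h1 : (List.range lf.length).foldl
      (fun (st : Int × Int) (k : Nat) =>
        (PySem.List.pyGetD lf (k : Int) []).foldl
          (fun (st : Int × Int) a =>
            if a.2 == especie && decide (a.1 > st.1) then (a.1, ((k : Nat) : Int)) else st) st)
      (0, -1)
    = (List.range lf.length).foldl
      (fun (st : Int × Int) (k : Nat) =>
        (lf.getD k []).foldl
          (fun (st : Int × Int) a =>
            if a.2 == especie && decide (a.1 > st.1) then (a.1, (0 : Int) + (k : Int)) else st) st)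
      (0, -1) := by
    apply PySem.List.foldl_congr_mem
    intro acc k _
    simp [PySem.List.pyGetD_natCast]
  rw [h1, pv_bridge lf (fun (st : Int × Int) (i : Int) (field : List (Int × String)) =>
      field.foldl (fun (st : Int × Int) a =>
        if a.2 == especie && decide (a.1 > st.1) then (a.1, i) else st) st) 0 (0, -1)]
  rw [pvCands, List.foldl_flatMap]
  apply PySem.List.foldl_congr_mem
  intro acc q _
  rw [List.foldl_map, ← PySem.List.foldl_if_eq_foldl_filter]
  apply PySem.List.foldl_congr_mem
  intro st a _
  by_cases he : (a.2 == especie) = true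
  · simp [pvStep, he]
  · simp [he]

-- B's candidate list is the positive-size sub-stream of pvCands
theorem pv_cands_filter (especie : String) (lf : List (List (Int × String))) :
    (PySem.List.enumerate lf).flatMap (fun p =>
        (p.2.filter (fun a => a.2 == especie && decide (a.1 > 0))).map (fun a => (a.1, p.1)))
      = (pvCands especie lf).filter (fun q => decide (0 < q.1)) := by
  rw [pvCands, List.filter_flatMap]
  congr 1
  funext p
  rw [List.filter_map, List.filter_filter]
  apply congrArg
  apply List.filter_congr
  intro a _
  simp [Function.comp, Bool.and_comm]

-- ===== VERDICT (by name: the statement is the Claim_ definition above) =====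
theorem maior_abobora_spec : Claim_equal_maior_abobora := by
  intro especie lf _
  unfold Spec_maior_abobora
  have hA : maior_abobora especie lf =
      (if (0:Int) < pvMax (pvCands especie lf) 0
       then (((pvCands especie lf).find? (fun q => q.1 == pvMax (pvCands especie lf) 0)).map Prod.snd).getD (-1)
       else -1) := by
    rw [pv_A_flat especie lf, pv_runfold (pvCands especie lf) 0 (-1)]
  rw [hA]
  unfold maior_abobora_alt
  simp only [pv_cands_filter especie lf]
  set C := pvCands especie lf with hC
  have hMfilter : pvMax C 0 = pvMax (C.filter (fun q => decide (0 < q.1))) 0 := by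
    unfold pvMax
    rw [pv_max_filter (C.map Prod.fst) 0 0 le_rfl, List.filter_map]
    rfl
  cases hF : C.filter (fun q => decide (0 < q.1)) with
  | nil =>
    have hM : pvMax C 0 = 0 := by rw [hMfilter, hF]; simp [pvMax]
    simp [hM]
  | cons c t =>
    have hcmem : c ∈ C.filter (fun q => decide (0 < q.1)) := by
      rw [hF]; exact List.mem_cons_self
    have hcpos : (0:Int) < c.1 := by simpa using (List.mem_filter.mp hcmem).2
    have hM2 : pvMax C 0 = pvMax t c.1 := by
      rw [hMfilter, hF, pvMax_cons]
      exact max_eq_right (le_trans (le_of_lt hcpos) (pvMax_le t c.1))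
    have hpos : (0:Int) < pvMax C 0 := by
      rw [hM2]; exact lt_of_lt_of_le hcpos (pvMax_le t c.1)
    have hbest : ((PySem.List.max? ((c :: t).map Prod.fst) (fun x => x)).getD 0) = pvMax C 0 := by
      rw [hM2]
      simp [PySem.List.max?_id_cons, pvMax]
    have hfind : (c :: t).find? (fun q => q.1 == pvMax C 0)
        = C.find? (fun q => q.1 == pvMax C 0) := by
      rw [← hF, List.find?_filter]
      apply pv_find_congr
      intro x _
      by_cases hx : x.1 = pvMax C 0
      · simp only [hx]
        simp [hpos]
      · simp [hx]
    rw [if_pos hpos]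
    show (Option.map Prod.snd (List.find? (fun q => q.1 == pvMax C 0) C)).getD (-1)
        = (Option.map Prod.snd (List.find?
            (fun q => q.1 == (PySem.List.max? ((c :: t).map Prod.fst) (fun x => x)).getD 0)
            (c :: t))).getD (-1)
    rw [hbest, hfind]
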